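-- pv_equiv track=rewrite | github.com/Airyshtoteles/learnLeetCode | Day14/Part2/bfs_dynamic.py | _collect_cells
-- ===== SOURCE A (Python) =====
-- from typing import List, Tuple, Optional, Set
--
-- Pos = Tuple[int, int]
--
-- Grid = List[List[str]]
--
-- def _collect_cells(maze: Grid):
--     n = len(maze)
--     starts: List[Pos] = []
--     exits: List[Pos] = []
--     portals: List[Pos] = []
--     empties: List[Pos] = []
--     for i in range(n):
--         for j in range(len(maze[i])):
--             c = maze[i][j]
--             if c == 'S':
--                 starts.append((i, j))
--             elif c == 'X':
--                 exits.append((i, j))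
--             elif c == 'P':
--                 portals.append((i, j))
--             if c == 'E' or c == 'P':
--                 empties.append((i, j))
--     return starts, exits, portals, empties
-- ===== SOURCE B (Python) =====
-- def _collect_cells(maze):
--     cells = [(i, j, c) for i, row in enumerate(maze) for j, c in enumerate(row)]
--
--     def pick(chars):
--         return [(i, j) for (i, j, c) in cells if c in chars]
--
--     return pick(('S',)), pick(('X',)), pick(('P',)), pick(('E', 'P'))
-- ===== Notes on version B (the rewrite author's own statement) =====
-- stated objective: idiomatic
-- what changed: A classifies each cell inside one nested loop via an if/elif chain appending to four accumulators; B first flattens the grid into one enumerated cell list and then derives each of the four result lists by an independent filtering comprehension over it.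
import Mathlib
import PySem

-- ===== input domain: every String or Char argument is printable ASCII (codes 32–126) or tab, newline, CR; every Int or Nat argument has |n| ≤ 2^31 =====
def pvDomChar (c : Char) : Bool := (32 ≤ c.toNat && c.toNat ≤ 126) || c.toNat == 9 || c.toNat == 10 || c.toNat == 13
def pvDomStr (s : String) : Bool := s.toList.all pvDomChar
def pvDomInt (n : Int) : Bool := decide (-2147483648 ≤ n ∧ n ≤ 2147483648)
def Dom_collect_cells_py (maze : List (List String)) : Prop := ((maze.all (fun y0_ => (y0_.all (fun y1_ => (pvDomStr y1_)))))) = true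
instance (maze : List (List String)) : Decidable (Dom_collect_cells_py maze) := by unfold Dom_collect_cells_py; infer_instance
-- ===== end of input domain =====

-- B instead builds one flattened enumerated cell list and derives each of the four
-- result lists by an independent filtering pass over it (no if/elif dispatch).

-- ===== PORT A =====
-- literal port of A's nested loop: one scan, four accumulators, if/elif chain per cell
def collect_cells_py (maze : List (List String)) : (List (Int × Int)) × (List (Int × Int)) × (List (Int × Int)) × (List (Int × Int)) :=
  (PySem.List.enumerate maze).foldl
    (fun st p =>
      (PySem.List.enumerate p.2).foldl
        (fun st2 q =>
          let c := q.2
          let st3 :=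
            if c = "S" then (st2.1 ++ [(p.1, q.1)], st2.2.1, st2.2.2.1, st2.2.2.2)
            else if c = "X" then (st2.1, st2.2.1 ++ [(p.1, q.1)], st2.2.2.1, st2.2.2.2)
            else if c = "P" then (st2.1, st2.2.1, st2.2.2.1 ++ [(p.1, q.1)], st2.2.2.2)
            else st2
          if c = "E" ∨ c = "P" then (st3.1, st3.2.1, st3.2.2.1, st3.2.2.2 ++ [(p.1, q.1)])
          else st3)
        st)
    ([], [], [], [])

-- ===== PORT B =====
-- pick(chars) of Source B: one filtering comprehension over the flattened cell list
def pvPick (cells : List (Int × Int × String)) (chars : List String) : List (Int × Int) :=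
  cells.filterMap (fun t => if t.2.2 ∈ chars then some (t.1, t.2.1) else none)

def collect_cells_py_alt (maze : List (List String)) : (List (Int × Int)) × (List (Int × Int)) × (List (Int × Int)) × (List (Int × Int)) :=
  let cells := (PySem.List.enumerate maze).flatMap
    (fun p => (PySem.List.enumerate p.2).map (fun q => (p.1, q.1, q.2)))
  (pvPick cells ["S"], pvPick cells ["X"], pvPick cells ["P"], pvPick cells ["E", "P"])

-- ===== PRECONDITION & SPEC =====
def Spec_collect_cells_py (maze : List (List String)) (out : (List (Int × Int)) × (List (Int × Int)) × (List (Int × Int)) × (List (Int × Int))) : Prop := out = collect_cells_py_alt maze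
instance (maze : List (List String)) (out : (List (Int × Int)) × (List (Int × Int)) × (List (Int × Int)) × (List (Int × Int))) : Decidable (Spec_collect_cells_py maze out) := by unfold Spec_collect_cells_py; infer_instance

-- ===== CLAIM (what is proved, stated in full; the proofs are below) =====
def Claim_equal_collect_cells_py : Prop := ∀ (maze : List (List String)), Dom_collect_cells_py maze → Spec_collect_cells_py maze (collect_cells_py maze)

-- ===== LEMMAS AND PROOFS =====

-- A's per-cell body, abstracted over the flattened cell triple
def pvStep (st : (List (Int × Int)) × (List (Int × Int)) × (List (Int × Int)) × (List (Int × Int)))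
    (t : Int × Int × String) : (List (Int × Int)) × (List (Int × Int)) × (List (Int × Int)) × (List (Int × Int)) :=
  let c := t.2.2
  let st3 :=
    if c = "S" then (st.1 ++ [(t.1, t.2.1)], st.2.1, st.2.2.1, st.2.2.2)
    else if c = "X" then (st.1, st.2.1 ++ [(t.1, t.2.1)], st.2.2.1, st.2.2.2)
    else if c = "P" then (st.1, st.2.1, st.2.2.1 ++ [(t.1, t.2.1)], st.2.2.2)
    else st
  if c = "E" ∨ c = "P" then (st3.1, st3.2.1, st3.2.2.1, st3.2.2.2 ++ [(t.1, t.2.1)])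
  else st3

-- folding A's body over any cell list just appends the four filtered sublists
theorem pvStep_foldl (L : List (Int × Int × String))
    (s e p m : List (Int × Int)) :
    L.foldl pvStep (s, e, p, m) =
      (s ++ pvPick L ["S"], e ++ pvPick L ["X"], p ++ pvPick L ["P"], m ++ pvPick L ["E", "P"]) := by
  induction L generalizing s e p m with
  | nil => simp [pvPick]
  | cons t L ih =>
    obtain ⟨i, j, c⟩ := t
    by_cases hS : c = "S" <;> by_cases hX : c = "X" <;> by_cases hP : c = "P" <;>
      by_cases hE : c = "E" <;>
        simp_all [pvStep, pvPick, List.foldl_cons]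

-- A's nested fold is the fold of pvStep over the flattened cell list
theorem pvA_flat (maze : List (List String)) :
    collect_cells_py maze =
      ((PySem.List.enumerate maze).flatMap
        (fun p => (PySem.List.enumerate p.2).map (fun q => (p.1, q.1, q.2)))).foldl
        pvStep ([], [], [], []) := by
  rw [List.foldl_flatMap]
  unfold collect_cells_py
  congr 1
  funext st p
  rw [List.foldl_map]
  rfl

-- ===== VERDICT (by name: the statement is the Claim_ definition above) =====
theorem collect_cells_py_spec : Claim_equal_collect_cells_py := by
  intro maze _
  unfold Spec_collect_cells_py collect_cells_py_alt
  rw [pvA_flat, pvStep_foldl]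
  simp
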